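-- pv_equiv track=rewrite | github.com/l-i-p-f/LangChainAgent | src/test_embedding_retrieval.py | compare_two_sentence
-- ===== SOURCE A (Python) =====
-- def compare_two_sentence(short_x, long_y) -> bool:
--     """ 比较两个字符串，只要短串内容出现（不需要相邻）在长串中即认为相似 """
--     m, n = len(short_x), len(long_y)
--
--     if m > n:
--         return False
--
--     dp = [[False] * (n + 1) for _ in range(m + 1)]
--
--     dp[0][0] = True
--
--     for i in range(m + 1):
--         for j in range(n + 1):
--             if i == 0 and j == 0:
--                 continue
--             elif i == 0:
--                 dp[i][j] = True
--             elif j == 0: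
--                 dp[i][j] = False
--             elif short_x[i - 1] == long_y[j - 1]:
--                 dp[i][j] = dp[i - 1][j - 1]
--             else:
--                 dp[i][j] = dp[i][j - 1]
--
--     return dp[m][n]
-- ===== SOURCE B (Python) =====
-- def compare_two_sentence(short_x, long_y) -> bool:
--     """Two-pointer greedy scan: advance a pointer into short_x each time its
--     next character appears in long_y; short_x is a subsequence iff the pointer
--     reaches the end."""
--     i = 0
--     m = len(short_x)
--     for ch in long_y:
--         if i < m and short_x[i] == ch:
--             i += 1
--     return i == m
-- ===== Notes on version B (the rewrite author's own statement) =====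
-- stated objective: faster
-- what changed: Replaced the (m+1)x(n+1) dynamic-programming table with a single greedy two-pointer pass over the long string.
import Mathlib
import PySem

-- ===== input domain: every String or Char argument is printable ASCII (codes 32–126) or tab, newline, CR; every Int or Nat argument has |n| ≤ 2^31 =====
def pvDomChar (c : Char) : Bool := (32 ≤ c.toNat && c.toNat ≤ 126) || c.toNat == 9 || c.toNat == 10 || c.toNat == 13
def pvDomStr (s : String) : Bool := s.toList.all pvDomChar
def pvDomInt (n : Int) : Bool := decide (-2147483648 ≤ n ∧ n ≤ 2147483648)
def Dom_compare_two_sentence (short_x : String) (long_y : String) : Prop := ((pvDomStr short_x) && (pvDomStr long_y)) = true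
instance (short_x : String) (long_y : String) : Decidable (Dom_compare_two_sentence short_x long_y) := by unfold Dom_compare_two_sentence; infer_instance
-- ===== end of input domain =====

-- B replaces A's (m+1)×(n+1) DP table with one greedy two-pointer pass (asymptotically faster).

-- ===== PORT A =====
-- dp[i][j] := v   (Python list-of-lists assignment)
def pvSet2 (dp : List (List Bool)) (i j : Nat) (v : Bool) : List (List Bool) :=
  dp.set i ((dp.getD i []).set j v)

-- dp[i][j]   (indices are always in range in A, so getD is exact)
def pvGet2 (dp : List (List Bool)) (i j : Nat) : Bool :=
  (dp.getD i []).getD j false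

-- the body of A's inner loop, one (i, j) cell
def pvCell (x y : List Char) (i j : Nat) (dp : List (List Bool)) : List (List Bool) :=
  if i = 0 ∧ j = 0 then dp
  else if i = 0 then pvSet2 dp i j true
  else if j = 0 then pvSet2 dp i j false
  else if x.getD (i-1) ' ' = y.getD (j-1) ' ' then pvSet2 dp i j (pvGet2 dp (i-1) (j-1))
  else pvSet2 dp i j (pvGet2 dp i (j-1))

-- dp = [[False]*(n+1) for _ in range(m+1)]; dp[0][0] = True
def pvInit (m n : Nat) : List (List Bool) :=
  pvSet2 (List.replicate (m+1) (List.replicate (n+1) false)) 0 0 true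

def compare_two_sentence (short_x : String) (long_y : String) : Bool :=
  let x := short_x.toList
  let y := long_y.toList
  let m := x.length
  let n := y.length
  if m > n then false
  else
    let dp := (List.range (m+1)).foldl
      (fun dp i => (List.range (n+1)).foldl (fun dp j => pvCell x y i j dp) dp)
      (pvInit m n)
    pvGet2 dp m n

-- ===== PORT B =====
def compare_two_sentence_alt (short_x : String) (long_y : String) : Bool :=
  let x := short_x.toList
  let m := x.length
  let i := long_y.toList.foldl
    (fun i ch => if i < m ∧ x.getD i ' ' = ch then i + 1 else i) 0
  i == m

-- ===== PRECONDITION & SPEC =====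
def Spec_compare_two_sentence (short_x : String) (long_y : String) (out : Bool) : Prop := out = compare_two_sentence_alt short_x long_y
instance (short_x : String) (long_y : String) (out : Bool) : Decidable (Spec_compare_two_sentence short_x long_y out) := by unfold Spec_compare_two_sentence; infer_instance

-- ===== CLAIM (what is proved, stated in full; the proofs are below) =====
def Claim_equal_compare_two_sentence : Prop := ∀ (short_x : String) (long_y : String), Dom_compare_two_sentence short_x long_y → Spec_compare_two_sentence short_x long_y (compare_two_sentence short_x long_y)

-- ===== LEMMAS AND PROOFS =====

-- the value A's recurrence assigns to cell (i, j)
def pvF (x y : List Char) : Nat → Nat → Bool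
  | 0, _ => true
  | _+1, 0 => false
  | i+1, j+1 =>
    if x.getD i ' ' = y.getD j ' ' then pvF x y i j else pvF x y (i+1) j

lemma pv_snoc_sublist_snoc_ne {a b : Char} (h : a ≠ b) (l₁ l₂ : List Char) :
    (l₁ ++ [a]).Sublist (l₂ ++ [b]) ↔ (l₁ ++ [a]).Sublist l₂ := by
  constructor
  · intro h'
    have h2 := List.reverse_sublist.mpr h'
    simp only [List.reverse_append, List.reverse_singleton, List.singleton_append] at h2
    cases h2 with
    | cons _ h3 =>
        exact List.reverse_sublist.mp (by simpa [List.reverse_append] using h3)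
    | cons₂ => exact absurd rfl h
  · intro h'
    exact h'.trans (List.sublist_append_left l₂ [b])

lemma pvF_eq_sublist (x y : List Char) :
    ∀ j i, i ≤ x.length → j ≤ y.length →
      pvF x y i j = decide ((x.take i).Sublist (y.take j)) := by
  intro j
  induction j with
  | zero =>
      intro i hi _
      cases i with
      | zero => simp [pvF]
      | succ i' =>
          have hne : x.take (i'+1) ≠ [] := by
            have : (x.take (i'+1)).length = i'+1 := by
              simp [List.length_take]; omega
            intro hnil; simp [hnil] at this
          simp [pvF, List.sublist_nil, hne]
  | succ j' ih =>
      intro i hi hj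
      cases i with
      | zero => simp [pvF]
      | succ i' =>
          have hi' : i' < x.length := by omega
          have hj'' : j' < y.length := by omega
          have hx : x.take (i'+1) = x.take i' ++ [x[i']] := by
            rw [List.take_add_one]; simp [List.getElem?_eq_getElem hi']
          have hy : y.take (j'+1) = y.take j' ++ [y[j']] := by
            rw [List.take_add_one]; simp [List.getElem?_eq_getElem hj'']
          have hgx : x.getD i' ' ' = x[i'] := List.getD_eq_getElem x ' ' hi'
          have hgy : y.getD j' ' ' = y[j'] := List.getD_eq_getElem y ' ' hj''
          by_cases hc : x.getD i' ' ' = y.getD j' ' '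
          · have hcc : x[i'] = y[j'] := by rw [← hgx, ← hgy, hc]
            rw [pvF, if_pos hc, ih i' (by omega) (by omega)]
            simp only [hx, hy, hcc, List.append_sublist_append_right]
          · have hcc : x[i'] ≠ y[j'] := by rw [← hgx, ← hgy]; exact hc
            rw [pvF, if_neg hc, ih (i'+1) (by omega) (by omega)]
            simp only [hx, hy, pv_snoc_sublist_snoc_ne hcc]

-- ---- DP-table invariant ----
def pvShape (m n : Nat) (dp : List (List Bool)) : Prop :=
  dp.length = m+1 ∧ ∀ r ∈ dp, r.length = n+1

lemma pvShape_set2 {m n : Nat} {dp : List (List Bool)} (h : pvShape m n dp)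
    (i j : Nat) (v : Bool) (hi : i ≤ m) : pvShape m n (pvSet2 dp i j v) := by
  obtain ⟨hl, hr⟩ := h
  refine ⟨by simp [pvSet2, hl], ?_⟩
  intro r hrm
  rcases List.mem_or_eq_of_mem_set hrm with hmem | rfl
  · exact hr r hmem
  · have hilt : i < dp.length := by omega
    rw [List.getD_eq_getElem dp [] hilt]
    simp [hr _ (dp.getElem_mem hilt)]

lemma pvGet2_set2_eq {m n : Nat} {dp : List (List Bool)} (h : pvShape m n dp)
    {i j : Nat} (v : Bool) (hi : i ≤ m) (hj : j ≤ n) :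
    pvGet2 (pvSet2 dp i j v) i j = v := by
  obtain ⟨hl, hr⟩ := h
  have hilt : i < dp.length := by omega
  have hrow : (dp.getD i []).length = n+1 := by
    rw [List.getD_eq_getElem dp [] hilt]; exact hr _ (dp.getElem_mem hilt)
  have hjlt : j < (dp.getD i []).length := by omega
  have h1 : (dp.set i ((dp.getD i []).set j v)).getD i [] = (dp.getD i []).set j v := by
    rw [List.getD_eq_getElem?_getD, List.getElem?_set_self (by simpa using hilt)]
    rfl
  unfold pvGet2 pvSet2
  rw [h1, List.getD_eq_getElem?_getD, List.getElem?_set_self hjlt]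
  rfl

lemma pvGet2_set2_ne {m n : Nat} {dp : List (List Bool)} (h : pvShape m n dp)
    {i j i' j' : Nat} (v : Bool) (hi : i ≤ m) (hne : i ≠ i' ∨ j ≠ j') :
    pvGet2 (pvSet2 dp i j v) i' j' = pvGet2 dp i' j' := by
  obtain ⟨hl, hr⟩ := h
  have hilt : i < dp.length := by omega
  unfold pvGet2 pvSet2
  by_cases hii : i = i'
  · subst hii
    have hjj : j ≠ j' := by tauto
    have h1 : (dp.set i ((dp.getD i []).set j v)).getD i [] = (dp.getD i []).set j v := by
      rw [List.getD_eq_getElem?_getD, List.getElem?_set_self (by simpa using hilt)]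
      rfl
    rw [h1, List.getD_eq_getElem?_getD, List.getElem?_set_ne hjj,
      ← List.getD_eq_getElem?_getD]
  · have h2 : (dp.set i ((dp.getD i []).set j v)).getD i' [] = dp.getD i' [] := by
      rw [List.getD_eq_getElem?_getD, List.getElem?_set_ne hii,
        ← List.getD_eq_getElem?_getD]
    rw [h2]

-- cells lexicographically before (i, t) hold pvF; the rest still hold the initial value
def pvInv (x y : List Char) (i t : Nat) (dp : List (List Bool)) : Prop :=
  pvShape x.length y.length dp ∧
  (∀ k j, k ≤ x.length → j ≤ y.length →
    ((k < i ∨ (k = i ∧ j < t)) → pvGet2 dp k j = pvF x y k j) ∧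
    ((i < k ∨ (k = i ∧ t ≤ j)) → pvGet2 dp k j = decide (k = 0 ∧ j = 0)))

lemma pvShape_replicate (m n : Nat) :
    pvShape m n (List.replicate (m+1) (List.replicate (n+1) false)) := by
  constructor
  · simp
  · intro r hr
    rw [List.eq_of_mem_replicate hr]
    simp

lemma pvGet2_replicate (m n k j : Nat) :
    pvGet2 (List.replicate (m+1) (List.replicate (n+1) false)) k j = false := by
  unfold pvGet2
  simp only [List.getD_eq_getElem?_getD, List.getElem?_replicate]
  by_cases hk : k < m+1
  · simp only [if_pos hk, Option.getD_some, List.getElem?_replicate]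
    split <;> rfl
  · simp only [if_neg hk, Option.getD_none]
    rfl

lemma pvInv_init (x y : List Char) : pvInv x y 0 0 (pvInit x.length y.length) := by
  unfold pvInit
  have hs := pvShape_replicate x.length y.length
  refine ⟨pvShape_set2 hs 0 0 true (by omega), ?_⟩
  intro k j hk hj
  refine ⟨fun hp => by omega, fun _ => ?_⟩
  by_cases hkj : k = 0 ∧ j = 0
  · obtain ⟨rfl, rfl⟩ := hkj
    rw [pvGet2_set2_eq hs true (by omega) (by omega)]
    simp
  · have hne : (0 : Nat) ≠ k ∨ (0 : Nat) ≠ j := by omega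
    rw [pvGet2_set2_ne hs true (by omega) hne, pvGet2_replicate]
    simp only [decide_eq_false hkj]

-- writing the correct value into cell (i, j) advances the invariant by one cell
lemma pvInv_set (x y : List Char) (i j : Nat) (dp : List (List Bool))
    (h : pvInv x y i j dp) (hi : i ≤ x.length) (hj : j ≤ y.length)
    (v : Bool) (hv : v = pvF x y i j) :
    pvInv x y i (j+1) (pvSet2 dp i j v) := by
  obtain ⟨hs, hc⟩ := h
  refine ⟨pvShape_set2 hs i j v hi, ?_⟩
  intro k jj hk hjj
  constructor
  · intro hp
    by_cases hkj : k = i ∧ jj = j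
    · obtain ⟨rfl, rfl⟩ := hkj
      rw [pvGet2_set2_eq hs v hi hj, hv]
    · have hne : i ≠ k ∨ j ≠ jj := by omega
      rw [pvGet2_set2_ne hs v hi hne]
      exact (hc k jj hk hjj).1 (by omega)
  · intro hp
    have hne : i ≠ k ∨ j ≠ jj := by omega
    rw [pvGet2_set2_ne hs v hi hne]
    exact (hc k jj hk hjj).2 (by omega)

lemma pvInv_cell (x y : List Char) (i j : Nat) (dp : List (List Bool))
    (h : pvInv x y i j dp) (hi : i ≤ x.length) (hj : j ≤ y.length) :
    pvInv x y i (j+1) (pvCell x y i j dp) := by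
  unfold pvCell
  by_cases hb : i = 0 ∧ j = 0
  · rw [if_pos hb]
    obtain ⟨rfl, rfl⟩ := hb
    obtain ⟨hs, hc⟩ := h
    refine ⟨hs, ?_⟩
    intro k jj hk hjj
    refine ⟨?_, fun hp => (hc k jj hk hjj).2 (by omega)⟩
    intro hp
    have hk0 : k = 0 ∧ jj = 0 := by omega
    obtain ⟨rfl, rfl⟩ := hk0
    rw [(hc 0 0 hk hjj).2 (by omega)]
    simp [pvF]
  · rw [if_neg hb]
    by_cases hi0 : i = 0
    · rw [if_pos hi0]
      subst hi0
      exact pvInv_set x y 0 j dp h hi hj true (by simp [pvF])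
    · rw [if_neg hi0]
      by_cases hj0 : j = 0
      · rw [if_pos hj0]
        subst hj0
        obtain ⟨i', rfl⟩ : ∃ i', i = i'+1 := ⟨i-1, by omega⟩
        exact pvInv_set x y (i'+1) 0 dp h hi hj false (by simp [pvF])
      · rw [if_neg hj0]
        obtain ⟨i', rfl⟩ : ∃ i', i = i'+1 := ⟨i-1, by omega⟩
        obtain ⟨j', rfl⟩ : ∃ j', j = j'+1 := ⟨j-1, by omega⟩
        obtain ⟨hs, hc⟩ := h
        have hr1 : pvGet2 dp i' j' = pvF x y i' j' :=
          (hc i' j' (by omega) (by omega)).1 (by omega)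
        have hr2 : pvGet2 dp (i'+1) j' = pvF x y (i'+1) j' :=
          (hc (i'+1) j' (by omega) (by omega)).1 (by omega)
        simp only [Nat.add_sub_cancel]
        by_cases hch : x.getD i' ' ' = y.getD j' ' '
        · rw [if_pos hch, hr1]
          exact pvInv_set x y (i'+1) (j'+1) dp ⟨hs, hc⟩ hi hj (pvF x y i' j')
            (by rw [pvF, if_pos hch])
        · rw [if_neg hch, hr2]
          exact pvInv_set x y (i'+1) (j'+1) dp ⟨hs, hc⟩ hi hj (pvF x y (i'+1) j')
            (by rw [pvF, if_neg hch])

lemma pvInv_inner (x y : List Char) (i : Nat) (dp : List (List Bool))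
    (h : pvInv x y i 0 dp) (hi : i ≤ x.length) :
    pvInv x y i (y.length+1)
      ((List.range (y.length+1)).foldl (fun dp j => pvCell x y i j dp) dp) := by
  have gen : ∀ t, t ≤ y.length + 1 →
      pvInv x y i t ((List.range t).foldl (fun dp j => pvCell x y i j dp) dp) := by
    intro t
    induction t with
    | zero => intro _; simpa using h
    | succ t' ih =>
        intro ht
        rw [show List.range (t'+1) = List.range t' ++ [t'] from List.range_succ,
          List.foldl_append]
        exact pvInv_cell x y i t' _ (ih (by omega)) hi (by omega)
  exact gen (y.length+1) le_rfl

lemma pvInv_shift (x y : List Char) (i : Nat) (dp : List (List Bool))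
    (h : pvInv x y i (y.length+1) dp) : pvInv x y (i+1) 0 dp := by
  obtain ⟨hs, hc⟩ := h
  refine ⟨hs, ?_⟩
  intro k j hk hj
  obtain ⟨h1, h2⟩ := hc k j hk hj
  constructor
  · intro hp; exact h1 (by omega)
  · intro hp; exact h2 (by omega)

lemma pvInv_outer (x y : List Char) :
    ∀ s, s ≤ x.length + 1 →
      pvInv x y s 0
        ((List.range s).foldl
          (fun dp i => (List.range (y.length+1)).foldl (fun dp j => pvCell x y i j dp) dp)
          (pvInit x.length y.length)) := by
  intro s
  induction s with
  | zero => intro _; exact pvInv_init x y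
  | succ s' ih =>
      intro hs
      rw [show List.range (s'+1) = List.range s' ++ [s'] from List.range_succ,
        List.foldl_append]
      exact pvInv_shift x y s' _
        (pvInv_inner x y s' _ (ih (by omega)) (by omega))

lemma pvA_eq_pvF (x y : List Char) :
    pvGet2
      ((List.range (x.length+1)).foldl
        (fun dp i => (List.range (y.length+1)).foldl (fun dp j => pvCell x y i j dp) dp)
        (pvInit x.length y.length))
      x.length y.length = pvF x y x.length y.length := by
  have h2 := (pvInv_outer x y (x.length+1) (by omega)).2 x.length y.length le_rfl le_rfl
  exact h2.1 (by omega)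

-- ---- B's fold computes the greedy subsequence test ----
lemma pv_cons_sublist_cons_ne {a b : Char} (h : a ≠ b) (l ys : List Char) :
    (a::l).Sublist (b::ys) ↔ (a::l).Sublist ys := by
  constructor
  · intro h'
    cases h' with
    | cons _ h3 => exact h3
    | cons₂ => exact absurd rfl h
  · intro h'
    exact h'.cons b

lemma pvB_fold (x : List Char) :
    ∀ (ys : List Char) (i : Nat), i ≤ x.length →
      ((ys.foldl (fun i ch => if i < x.length ∧ x.getD i ' ' = ch then i + 1 else i) i)
        == x.length) = decide ((x.drop i).Sublist ys) := by
  intro ys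
  induction ys with
  | nil =>
      intro i hi
      by_cases h : i = x.length
      · subst h; simp
      · have hlt : i < x.length := by omega
        rw [List.drop_eq_getElem_cons hlt]
        simp [h, show ¬ x.length ≤ i from by omega]
  | cons ch ys ih =>
      intro i hi
      by_cases hlt : i < x.length
      · have hd := List.drop_eq_getElem_cons hlt
        by_cases heq : x.getD i ' ' = ch
        · have hc : x[i] = ch := by rw [← List.getD_eq_getElem x ' ' hlt, heq]
          rw [List.foldl_cons, if_pos (⟨hlt, heq⟩ : i < x.length ∧ x.getD i ' ' = ch),
            ih (i+1) (by omega), hd, hc]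
          simp [List.cons_sublist_cons]
        · have hc : x[i] ≠ ch := by rw [← List.getD_eq_getElem x ' ' hlt]; exact heq
          have hnp : ¬ (i < x.length ∧ x.getD i ' ' = ch) := by tauto
          rw [List.foldl_cons, if_neg hnp, ih i hi]
          exact decide_eq_decide.mpr
            (by rw [hd]; exact (pv_cons_sublist_cons_ne hc _ _).symm)
      · have hie : i = x.length := by omega
        subst hie
        have hnp : ¬ (x.length < x.length ∧ x.getD x.length ' ' = ch) := by
          intro h; exact absurd h.1 (lt_irrefl _)
        rw [List.foldl_cons, if_neg hnp, ih x.length le_rfl]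
        simp [List.drop_length, List.nil_sublist]

-- ===== VERDICT (by name: the statement is the Claim_ definition above) =====
theorem compare_two_sentence_spec : Claim_equal_compare_two_sentence := by
  intro short_x long_y _
  unfold Spec_compare_two_sentence compare_two_sentence compare_two_sentence_alt
  set x := short_x.toList with hx
  set y := long_y.toList with hy
  simp only []
  have hB : ((y.foldl (fun i ch => if i < x.length ∧ x.getD i ' ' = ch then i + 1 else i) 0)
      == x.length) = decide (x.Sublist y) := by
    simpa using pvB_fold x y 0 (by omega)
  by_cases hmn : x.length > y.length
  · rw [if_pos hmn, hB]
    have : ¬ x.Sublist y := fun hs => by have := hs.length_le; omega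
    simp [this]
  · rw [if_neg hmn, hB, pvA_eq_pvF x y,
      pvF_eq_sublist x y y.length x.length le_rfl le_rfl]
    simp [List.take_length]
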